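-- pv_equiv track=rewrite | github.com/brvv/leetcode | 2021/Dec/18th, at 13 27 - minimum number of operations to move all balls to each box.py | calculateRightArray
-- ===== SOURCE A (Python) =====
-- from typing import List
--
-- def calculateRightArray(boxes: List[int]) -> List[int]:
--     answer = [[0, 0] for _ in range(len(boxes))]
--     answer[0] = [0, boxes[0]]
--
--     for i in range(1, len(boxes)):
--         new_val = boxes[i] + answer[i-1][1]
--         new_moves = answer[i-1][0] + answer[i-1][1]
--         answer[i] = [new_moves, new_val]
--
--     return [pair[0] for pair in answer]
-- ===== SOURCE B (Python) =====
-- from typing import List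
--
-- def calculateRightArray(boxes: List[int]) -> List[int]:
--     n = len(boxes)
--     answer = [0] * n
--     answer[0] = 0
--     for i in range(1, n):
--         s = 0
--         for j in range(i):
--             s += boxes[j] * (i - j)
--         answer[i] = s
--     return answer
-- ===== Notes on version B (the rewrite author's own statement) =====
-- stated objective: alternative
-- what changed: Replaces A's single incremental pass carrying (moves, prefix-sum) pairs by a direct nested-loop computation of each entry from the definition sum boxes[j]*(i-j) over j<i.
import Mathlib
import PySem

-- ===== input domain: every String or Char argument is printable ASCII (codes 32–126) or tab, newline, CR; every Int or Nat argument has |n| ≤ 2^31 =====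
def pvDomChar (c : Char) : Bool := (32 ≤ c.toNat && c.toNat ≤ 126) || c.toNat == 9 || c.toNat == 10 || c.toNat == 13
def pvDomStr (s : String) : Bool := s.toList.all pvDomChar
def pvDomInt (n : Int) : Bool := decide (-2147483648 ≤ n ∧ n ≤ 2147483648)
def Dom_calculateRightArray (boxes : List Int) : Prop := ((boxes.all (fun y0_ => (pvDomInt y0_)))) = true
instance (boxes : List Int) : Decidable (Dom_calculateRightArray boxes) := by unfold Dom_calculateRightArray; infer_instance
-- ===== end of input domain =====

-- B replaces A's one-pass running (moves, prefix-sum) pair by the direct nested-loop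
-- definition answer[i] = Σ_{j<i} boxes[j]*(i-j); same return value on nonempty input.

-- ===== PORT A =====
-- one loop iteration: reads answer[i-1] (head of the reversed answer built so far)
def stepA (boxes : List Int) (acc : List (Int × Int)) (i : Int) : List (Int × Int) :=
  let prev := acc.headD (0, 0)
  let new_val := PySem.List.pyGetD boxes i 0 + prev.2
  let new_moves := prev.1 + prev.2
  (new_moves, new_val) :: acc

def calculateRightArray (boxes : List Int) : List Int :=
  if boxes.length = 0 then []   -- Python raises IndexError here (answer[0] = [0, boxes[0]]); excluded by Pre_
  else
    (((PySem.List.pyRange 1 (boxes.length) 1).foldl (stepA boxes)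
        [(0, PySem.List.pyGetD boxes 0 0)]).map Prod.fst).reverse

-- ===== PORT B =====
-- inner loop of B: s = Σ_{j<i} boxes[j]*(i-j)
def entryB (boxes : List Int) (i : Int) : Int :=
  (PySem.List.pyRange 0 i 1).foldl (fun s j => s + PySem.List.pyGetD boxes j 0 * (i - j)) 0

def calculateRightArray_alt (boxes : List Int) : List Int :=
  if boxes.length = 0 then []   -- Python raises IndexError here (answer[0] = 0); excluded by Pre_
  else 0 :: (PySem.List.pyRange 1 (boxes.length) 1).map (entryB boxes)

-- ===== PRECONDITION & SPEC =====
-- Both Pythons raise IndexError on the empty list (answer[0]); Pre_ excludes exactly that input.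
def Pre_calculateRightArray (boxes : List Int) : Prop := boxes ≠ []
instance (boxes : List Int) : Decidable (Pre_calculateRightArray boxes) := by
  unfold Pre_calculateRightArray; infer_instance

def pvWitness_calculateRightArray : List Int := ([1, 0, 3])

def Spec_calculateRightArray (boxes : List Int) (out : List Int) : Prop := out = calculateRightArray_alt boxes
instance (boxes : List Int) (out : List Int) : Decidable (Spec_calculateRightArray boxes out) := by unfold Spec_calculateRightArray; infer_instance

-- ===== CLAIM (what is proved, stated in full; the proofs are below) =====
def Claim_equal_calculateRightArray : Prop := ∀ (boxes : List Int), Dom_calculateRightArray boxes → Pre_calculateRightArray boxes → Spec_calculateRightArray boxes (calculateRightArray boxes)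

-- ===== LEMMAS AND PROOFS =====

-- prefix sum Σ_{j ≤ i} boxes[j] (via pyGetD, total)
def prefB (boxes : List Int) (i : Int) : Int :=
  ((PySem.List.pyRange 0 (i + 1) 1).map (fun j => PySem.List.pyGetD boxes j 0)).sum

theorem entryB_eq_sum (boxes : List Int) (i : Int) :
    entryB boxes i
      = ((PySem.List.pyRange 0 i 1).map (fun j => PySem.List.pyGetD boxes j 0 * (i - j))).sum := by
  unfold entryB
  rw [PySem.List.foldl_add]
  simp

theorem prefB_succ (boxes : List Int) (i : Int) (hi : 0 ≤ i) :
    prefB boxes (i + 1) = prefB boxes i + PySem.List.pyGetD boxes (i + 1) 0 := by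
  unfold prefB
  rw [PySem.List.pyRange_one_succ_right (by omega : (0:Int) ≤ i + 1)]
  simp

theorem entryB_succ (boxes : List Int) (i : Int) (hi : 0 ≤ i) :
    entryB boxes (i + 1) = entryB boxes i + prefB boxes i := by
  rw [entryB_eq_sum, entryB_eq_sum]
  unfold prefB
  rw [PySem.List.pyRange_one_succ_right hi]
  simp only [List.map_append, List.sum_append, List.map_cons, List.map_nil, List.sum_cons,
    List.sum_nil]
  have h : ∀ j ∈ PySem.List.pyRange 0 i 1,
      PySem.List.pyGetD boxes j 0 * (i + 1 - j)
        = PySem.List.pyGetD boxes j 0 * (i - j) + PySem.List.pyGetD boxes j 0 := by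
    intro j _; ring
  rw [List.map_congr_left h, List.sum_map_add]
  ring

theorem entryB_zero (boxes : List Int) : entryB boxes 0 = 0 := by
  unfold entryB
  rw [PySem.List.pyRange_one_eq_nil (by omega)]
  rfl

-- the invariant of A's loop: after the iterations i = 1 .. m the (reversed) answer list
-- holds exactly the pairs (entryB k, prefB k) for k = 0 .. m-1 ... actually k = 0..m
theorem foldA_eq (boxes : List Int) (b0 : Int) (hb : PySem.List.pyGetD boxes 0 0 = b0) :
    ∀ m : Nat,
      (PySem.List.pyRange 1 ((1 + m : Nat) : Int) 1).foldl (stepA boxes) [(0, b0)]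
        = ((PySem.List.pyRange 0 ((1 + m : Nat) : Int) 1).map
            (fun i => (entryB boxes i, prefB boxes i))).reverse := by
  intro m
  induction m with
  | zero =>
    have hc : ((1 + 0 : Nat) : Int) = 1 := by norm_num
    rw [hc]
    have h11 : PySem.List.pyRange 1 1 1 = [] := PySem.List.pyRange_one_eq_nil (le_refl 1)
    have h01 : PySem.List.pyRange 0 1 1 = [0] := by decide
    rw [h11, h01]
    simp [entryB_zero, prefB, h01, hb]
  | succ k ih =>
    have hcast : ((1 + (k + 1) : Nat) : Int) = ((1 + k : Nat) : Int) + 1 := by push_cast; ring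
    rw [hcast]
    rw [PySem.List.pyRange_one_succ_right (by push_cast; omega : (1:Int) ≤ ((1 + k : Nat) : Int))]
    rw [PySem.List.pyRange_one_succ_right (by push_cast; omega : (0:Int) ≤ ((1 + k : Nat) : Int))]
    rw [List.foldl_append, ih]
    simp only [List.foldl_cons, List.foldl_nil, List.map_append, List.map_cons, List.map_nil,
      List.reverse_append, List.reverse_cons, List.reverse_nil, List.nil_append, List.cons_append]
    -- head of the reversed list is the pair at index (1+k)-1
    have hlast : ((PySem.List.pyRange 0 ((1 + k : Nat) : Int) 1).map
        (fun i => (entryB boxes i, prefB boxes i))).reverse.headD (0, 0)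
        = (entryB boxes ((k : Nat) : Int), prefB boxes ((k : Nat) : Int)) := by
      have h1 : ((1 + k : Nat) : Int) = ((k : Nat) : Int) + 1 := by push_cast; ring
      rw [h1, PySem.List.pyRange_one_succ_right (by positivity)]
      simp
    unfold stepA
    rw [hlast]
    have h2 : ((1 + k : Nat) : Int) = ((k : Nat) : Int) + 1 := by push_cast; ring
    have he : entryB boxes ((1 + k : Nat) : Int)
        = entryB boxes ((k : Nat) : Int) + prefB boxes ((k : Nat) : Int) := by
      rw [h2, entryB_succ boxes _ (by positivity)]
    have hp : prefB boxes ((1 + k : Nat) : Int)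
        = prefB boxes ((k : Nat) : Int) + PySem.List.pyGetD boxes ((1 + k : Nat) : Int) 0 := by
      rw [h2, prefB_succ boxes _ (by positivity)]
    simp only [he, hp]
    rw [Int.add_comm (prefB boxes ((k : Nat) : Int)) (PySem.List.pyGetD boxes ((1 + k : Nat) : Int) 0)]

-- ===== VERDICT (by name: the statement is the Claim_ definition above) =====
theorem calculateRightArray_spec : Claim_equal_calculateRightArray := by
  intro boxes _ hpre
  unfold Spec_calculateRightArray
  cases boxes with
  | nil => exact absurd rfl hpre
  | cons b0 rest =>
    unfold calculateRightArray calculateRightArray_alt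
    rw [if_neg (by simp), if_neg (by simp)]
    have hb : PySem.List.pyGetD (b0 :: rest) 0 0 = b0 :=
      PySem.List.pyGetD_zero_cons b0 rest 0
    have hlen : (((b0 :: rest).length : Nat) : Int) = ((1 + rest.length : Nat) : Int) := by
      push_cast [List.length_cons]; ring
    rw [hlen, hb, foldA_eq (b0 :: rest) b0 hb rest.length]
    rw [List.map_reverse, List.reverse_reverse, List.map_map]
    rw [PySem.List.pyRange_one_cons (by push_cast; omega : (0:Int) < ((1 + rest.length : Nat) : Int))]
    simp only [List.map_cons, Function.comp]
    rw [entryB_zero]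
    simp [zero_add]
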